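-- pv_equiv track=rewrite | github.com/odoo/odoo | addons/cloud_storage_google/utils/cloud_storage_google_utils.py | get_canonical_headers
-- ===== SOURCE A (Python) =====
-- import collections
--
-- def get_canonical_headers(headers):
--     """Canonicalize headers for signing.
--
--     See:
--     https://cloud.google.com/storage/docs/access-control/signed-urls#about-canonical-extension-headers
--
--     :type headers: Union[dict|List(Tuple(str,str))]
--     :param headers:
--         (Optional) Additional HTTP headers to be included as part of the
--         signed URLs.  See:
--         https://cloud.google.com/storage/docs/xml-api/reference-headers
--         Requests using the signed URL *must* pass the specified header
--         (name and value) with each request for the URL.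
--
--     :rtype: str
--     :returns: List of headers, normalized / sortted per the URL refernced above.
--     """
--     if headers is None:
--         headers = []
--     elif isinstance(headers, dict):
--         headers = list(headers.items())
--
--     if not headers:
--         return [], []
--
--     normalized = collections.defaultdict(list)
--     for key, val in headers:
--         key = key.lower().strip()
--         val = " ".join(val.split())
--         normalized[key].append(val)
--
--     ordered_headers = sorted((key, ",".join(val)) for key, val in normalized.items())
--
--     canonical_headers = [f"{key}:{val}" for key, val in ordered_headers]
--     return canonical_headers, ordered_headers
-- ===== SOURCE B (Python) =====
-- def get_canonical_headers(headers):
--     """Canonicalize headers for signing: dedup+sort the normalized keys, then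
--     gather each key's values in input order (no dict index)."""
--     if headers is None:
--         headers = []
--     elif isinstance(headers, dict):
--         headers = list(headers.items())
--
--     if not headers:
--         return [], []
--
--     norm = [(key.lower().strip(), " ".join(val.split())) for key, val in headers]
--     keys = sorted(dict.fromkeys(key for key, _ in norm))
--     ordered_headers = [
--         (key, ",".join(val for k, val in norm if k == key)) for key in keys
--     ]
--     canonical_headers = [f"{key}:{val}" for key, val in ordered_headers]
--     return canonical_headers, ordered_headers
-- ===== Notes on version B (the rewrite author's own statement) =====
-- stated objective: alternative
-- what changed: Replaces A's defaultdict index plus tuple-sort of its items with a dict-free pipeline: normalize all pairs, dedup and sort the normalized keys, then gather each key's values from the normalized list in input order.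
import Mathlib
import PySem

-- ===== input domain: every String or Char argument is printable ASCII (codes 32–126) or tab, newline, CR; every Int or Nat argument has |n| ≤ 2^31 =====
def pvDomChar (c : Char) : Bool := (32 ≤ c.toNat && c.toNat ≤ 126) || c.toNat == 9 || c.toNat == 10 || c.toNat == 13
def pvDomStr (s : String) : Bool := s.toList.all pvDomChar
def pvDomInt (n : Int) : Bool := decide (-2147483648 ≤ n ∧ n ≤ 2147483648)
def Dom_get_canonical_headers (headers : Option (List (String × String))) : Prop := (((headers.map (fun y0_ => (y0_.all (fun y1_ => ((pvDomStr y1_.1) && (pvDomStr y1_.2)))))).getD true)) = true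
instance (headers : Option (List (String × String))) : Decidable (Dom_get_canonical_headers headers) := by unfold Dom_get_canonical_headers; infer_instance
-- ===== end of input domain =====

-- B replaces A's defaultdict index by dedup-and-sort of the normalized keys followed by a
-- per-key gather of the values in input order (objective: alternative, no dict).

-- shared normalization helpers (the same Python expressions appear in A and B)
def pvNormKey (k : String) : String := PySem.Str.strip (PySem.Str.lower k)
def pvNormVal (v : String) : String := PySem.Str.join " " (PySem.Str.split₀ v)

-- ===== PORT A =====
def get_canonical_headers (headers : Option (List (String × String))) : List String × (List (String × String)) :=
  let hs := headers.getD []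
  if hs = [] then ([], [])
  else
    let normalized : PySem.Dict String (List String) :=
      hs.foldl (fun d p => d.modify (pvNormKey p.1) [] (fun vs => vs ++ [pvNormVal p.2])) PySem.Dict.empty
    let ordered_headers :=
      PySem.List.sorted2 (normalized.items.map (fun q => (q.1, PySem.Str.join "," q.2)))
        (fun p => p.1) (fun p => p.2) false
    (ordered_headers.map (fun p => p.1 ++ ":" ++ p.2), ordered_headers)

-- ===== PORT B =====
def get_canonical_headers_alt (headers : Option (List (String × String))) : List String × (List (String × String)) :=
  let hs := headers.getD []
  if hs = [] then ([], [])
  else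
    let norm := hs.map (fun p => (pvNormKey p.1, pvNormVal p.2))
    let keys := PySem.List.sorted (PySem.List.dedup (norm.map (fun p => p.1))) (fun k => k) false
    let ordered_headers :=
      keys.map (fun k => (k, PySem.Str.join "," ((norm.filter (fun p => p.1 == k)).map (fun p => p.2))))
    (ordered_headers.map (fun p => p.1 ++ ":" ++ p.2), ordered_headers)

-- ===== PRECONDITION & SPEC =====
def Spec_get_canonical_headers (headers : Option (List (String × String))) (out : List String × (List (String × String))) : Prop := out = get_canonical_headers_alt headers
instance (headers : Option (List (String × String))) (out : List String × (List (String × String))) : Decidable (Spec_get_canonical_headers headers out) := by unfold Spec_get_canonical_headers; infer_instance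

-- ===== CLAIM (what is proved, stated in full; the proofs are below) =====
def Claim_equal_get_canonical_headers : Prop := ∀ (headers : Option (List (String × String))), Dom_get_canonical_headers headers → Spec_get_canonical_headers headers (get_canonical_headers headers)

-- ===== LEMMAS AND PROOFS =====

theorem pv_insertBy_congr {α : Type} (before before' : α → α → Bool) (x : α) (ys : List α)
    (h : ∀ b ∈ ys, before x b = before' x b) :
    PySem.List.insertBy before x ys = PySem.List.insertBy before' x ys := by
  induction ys with
  | nil => rfl
  | cons y ys ih =>
    simp only [PySem.List.insertBy]
    rw [h y (by simp)]
    by_cases hb : before' x y = true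
    · simp [hb]
    · simp [hb, ih (fun b hb' => h b (by simp [hb']))]

theorem pv_foldl_insertBy_congr {α : Type} (before before' : α → α → Bool) (l acc : List α)
    (h : ∀ a ∈ l, ∀ b, (b ∈ acc ∨ b ∈ l) → before a b = before' a b) :
    l.foldl (fun acc x => PySem.List.insertBy before x acc) acc
      = l.foldl (fun acc x => PySem.List.insertBy before' x acc) acc := by
  induction l generalizing acc with
  | nil => rfl
  | cons x l ih =>
    simp only [List.foldl_cons]
    rw [pv_insertBy_congr before before' x acc
      (fun b hb => h x (by simp) b (Or.inl hb))]
    exact ih (PySem.List.insertBy before' x acc)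
      (fun a ha b hb => by
        rcases hb with hb | hb
        · rcases (PySem.List.insertBy_mem_iff before' x b acc).mp hb with hb | hb
          · exact h a (by simp [ha]) b (Or.inr (by simp [hb]))
          · exact h a (by simp [ha]) b (Or.inl hb)
        · exact h a (by simp [ha]) b (Or.inr (by simp [hb])))

-- on a list whose first components are distinct, Python's tuple sort is the sort by first component
theorem pv_sorted2_eq_sorted_fst {α : Type} [LinearOrder α] (xs : List (String × α))
    (h : ∀ a ∈ xs, ∀ b ∈ xs, a.1 = b.1 → a = b) :
    PySem.List.sorted2 xs (fun p => p.1) (fun p => p.2) false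
      = PySem.List.sorted xs (fun p => p.1) false := by
  show List.foldl (fun acc x => PySem.List.insertBy
      (fun a b => decide (a.1 < b.1) || (!decide (b.1 < a.1) && decide (a.2 < b.2))) x acc) [] xs
    = List.foldl (fun acc x => PySem.List.insertBy (fun a b => decide (a.1 < b.1)) x acc) [] xs
  apply pv_foldl_insertBy_congr
  intro a ha b hb
  rcases hb with hb | hb
  · cases hb
  · by_cases h1 : a.1 < b.1
    · simp [h1]
    · by_cases h2 : b.1 < a.1
      · simp [h1, h2]
      · have hab : a = b := h a ha b hb (le_antisymm (not_lt.mp h2) (not_lt.mp h1))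
        subst hab
        simp

theorem pv_ordered_eq (norm : List (String × String)) :
    PySem.List.sorted2
      ((norm.foldl (fun d p => d.modify p.1 [] (fun vs => vs ++ [p.2])) PySem.Dict.empty).items.map
        (fun q => (q.1, PySem.Str.join "," q.2)))
      (fun p => p.1) (fun p => p.2) false
    = (PySem.List.sorted (PySem.Set.ofList (norm.map (fun p => p.1))) (fun k => k) false).map
        (fun k => (k, PySem.Str.join "," ((norm.filter (fun p => p.1 == k)).map (fun p => p.2)))) := by
  set D : PySem.Dict String (List String) :=
    norm.foldl (fun d p => d.modify p.1 [] (fun vs => vs ++ [p.2])) PySem.Dict.empty with hD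
  set K : List String := PySem.Set.ofList (norm.map (fun p => p.1)) with hK
  have hkeys : D.keys = K := by
    rw [hD, PySem.Dict.keys_foldl_modify_key norm (fun p => p.1) [] (fun _ p vs => vs ++ [p.2])
      PySem.Dict.empty, PySem.Dict.keys_empty]
    rfl
  have hnodup : D.keys.Nodup := by
    rw [hD]
    exact PySem.Dict.nodup_keys_foldl_modify_key norm (fun p => p.1) [] (fun _ p vs => vs ++ [p.2])
      PySem.Dict.empty (by simp [PySem.Dict.keys_empty])
  have hgetD : ∀ k, D.getD k [] = (norm.filter (fun p => p.1 == k)).map (fun p => p.2) := by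
    intro k
    rw [hD, PySem.Dict.getD_foldl_modify_append norm PySem.Dict.empty k,
      PySem.Dict.getD_empty]
    rfl
  have hitems : D.items = K.map (fun k => (k, (norm.filter (fun p => p.1 == k)).map (fun p => p.2))) := by
    rw [PySem.Dict.items_eq_map_keys D hnodup [], hkeys]
    exact List.map_congr_left (fun k _ => by rw [hgetD k])
  rw [hitems, List.map_map]
  have hmap : ((fun q : String × List String => (q.1, PySem.Str.join "," q.2)) ∘
      (fun k => (k, (norm.filter (fun p => p.1 == k)).map (fun p => p.2))))
      = fun k => (k, PySem.Str.join "," ((norm.filter (fun p => p.1 == k)).map (fun p => p.2))) := rfl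
  rw [hmap]
  set g : String → String × String :=
    fun k => (k, PySem.Str.join "," ((norm.filter (fun p => p.1 == k)).map (fun p => p.2))) with hg
  have hKlt : List.Pairwise (fun a b => a < b) (PySem.List.sorted K (fun k => k) false) := by
    rw [hK]
    exact PySem.List.sorted_ofList_pairwise_lt (norm.map (fun p => p.1))
  rw [pv_sorted2_eq_sorted_fst (K.map g)
    (by
      intro a ha b hb hab
      obtain ⟨ka, -, rfl⟩ := List.mem_map.mp ha
      obtain ⟨kb, -, rfl⟩ := List.mem_map.mp hb
      simp only [hg] at hab ⊢
      rw [hab])]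
  exact PySem.List.sorted_eq_of_perm_of_pairwise_lt (K.map g)
    ((PySem.List.sorted K (fun k => k) false).map g) (fun p => p.1)
    (List.Perm.map g (PySem.List.sorted_perm K (fun k => k) false))
    (List.pairwise_map.mpr (by exact hKlt))

-- ===== VERDICT (by name: the statement is the Claim_ definition above) =====
theorem get_canonical_headers_spec : Claim_equal_get_canonical_headers := by
  intro headers _
  unfold Spec_get_canonical_headers get_canonical_headers get_canonical_headers_alt
  cases headers with
  | none => rfl
  | some hs =>
    simp only [Option.getD_some]
    by_cases hnil : hs = []
    · simp [hnil]
    · simp only [hnil, if_false]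
      have hfold : hs.foldl (fun d p => d.modify (pvNormKey p.1) [] (fun vs => vs ++ [pvNormVal p.2]))
            PySem.Dict.empty
          = (hs.map (fun p => (pvNormKey p.1, pvNormVal p.2))).foldl
              (fun d p => d.modify p.1 [] (fun vs => vs ++ [p.2])) PySem.Dict.empty := by
        rw [List.foldl_map]
      rw [hfold, pv_ordered_eq (hs.map (fun p => (pvNormKey p.1, pvNormVal p.2)))]
      simp only [PySem.List.dedup_eq_ofList, List.map_map]
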